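-- pv_equiv track=rewrite | github.com/dosatos/algo-playground | dynamic/bitmasking/find_missing_spaces.py | _find
-- ===== SOURCE A (Python) =====
-- def _find(mask, text, vocabulary):
--     result = set()
--     word = ""
--     for j in range(len(text)):  # O(N)
--         word += text[j]
--         if mask & 1 << j:
--             result.add(word)
--             if word not in vocabulary:
--                 return
--             word = ""
--     return result
-- ===== SOURCE B (Python) =====
-- def _find(mask, text, vocabulary):
--     # Two-pass: compute boundary cut positions, slice into words, then validate.
--     boundaries = [j for j in range(len(text)) if mask & (1 << j)]
--     words = []
--     start = 0
--     for j in boundaries: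
--         words.append(text[start:j + 1])
--         start = j + 1
--     result = set()
--     for w in words:
--         if w not in vocabulary:
--             return None
--         result.add(w)
--     return result
-- ===== Notes on version B (the rewrite author's own statement) =====
-- stated objective: alternative
-- what changed: Replaces A's single interleaved char-by-char loop (accumulating a word and validating at each set bit) by three separate passes: compute boundary positions from the mask, slice the text into words at those positions, then validate the word list against the vocabulary.
import Mathlib
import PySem

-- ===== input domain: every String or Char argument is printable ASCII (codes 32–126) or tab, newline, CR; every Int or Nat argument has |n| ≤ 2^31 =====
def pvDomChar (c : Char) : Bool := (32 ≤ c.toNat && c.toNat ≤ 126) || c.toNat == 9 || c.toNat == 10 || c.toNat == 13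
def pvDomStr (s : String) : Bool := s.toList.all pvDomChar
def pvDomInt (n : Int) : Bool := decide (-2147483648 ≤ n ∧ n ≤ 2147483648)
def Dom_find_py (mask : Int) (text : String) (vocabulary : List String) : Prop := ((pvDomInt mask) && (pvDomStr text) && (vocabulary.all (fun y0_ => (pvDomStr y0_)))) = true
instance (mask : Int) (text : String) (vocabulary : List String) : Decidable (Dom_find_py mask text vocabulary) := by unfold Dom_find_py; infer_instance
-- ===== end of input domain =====

-- ===== PORT A =====
-- B restructures A's single interleaved loop into three separate passes (boundaries, slicing, validation); same cost.
-- A's loop 'for j in range(len(text)): word += text[j]; …' ported as structural recursion over the chars with index j.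
def findA_go (mask : Int) (vocab : List String) : List Char → Nat → PySem.Set String → List Char → Option (List String)
  | [], _, result, _ => some result
  | c :: d, j, result, word =>
    let word := word ++ [c]
    if PySem.Int.band mask ((2 : Int) ^ j) ≠ 0 then   -- mask & 1 << j  (1 << j = 2^j)
      let result := PySem.Set.add result (String.mk word)
      if vocab.contains (String.mk word) = false then none
      else findA_go mask vocab d (j + 1) result []
    else findA_go mask vocab d (j + 1) result word

def find_py (mask : Int) (text : String) (vocabulary : List String) : Option (List String) :=
  findA_go mask vocabulary text.toList 0 PySem.Set.empty []

-- ===== PORT B =====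
-- words loop: for j in boundaries: words.append(text[start:j+1]); start = j+1
def cutB (cs : List Char) : List Nat → Nat → List String → List String
  | [], _, words => words
  | j :: rest, start, words =>
    cutB cs rest (j + 1) (words ++ [String.mk (PySem.List.slice cs (some (start : Int)) (some ((j : Int) + 1)))])

-- validation pass: for w in words: if w not in vocabulary: return None; result.add(w)
def validateB (vocab : List String) : List String → PySem.Set String → Option (List String)
  | [], result => some result
  | w :: ws, result =>
    if vocab.contains w = false then none
    else validateB vocab ws (PySem.Set.add result w)

def find_py_alt (mask : Int) (text : String) (vocabulary : List String) : Option (List String) :=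
  let cs := text.toList
  let boundaries := (List.range cs.length).filter (fun j => decide (PySem.Int.band mask ((2 : Int) ^ j) ≠ 0))
  let words := cutB cs boundaries 0 []
  validateB vocabulary words PySem.Set.empty

-- ===== PRECONDITION & SPEC =====
def Spec_find_py (mask : Int) (text : String) (vocabulary : List String) (out : Option (List String)) : Prop := out = find_py_alt mask text vocabulary
instance (mask : Int) (text : String) (vocabulary : List String) (out : Option (List String)) : Decidable (Spec_find_py mask text vocabulary out) := by unfold Spec_find_py; infer_instance

-- ===== CLAIM (what is proved, stated in full; the proofs are below) =====
def Claim_equal_find_py : Prop := ∀ (mask : Int) (text : String) (vocabulary : List String), Dom_find_py mask text vocabulary → Spec_find_py mask text vocabulary (find_py mask text vocabulary)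

-- ===== LEMMAS AND PROOFS =====

-- segments of d (positions starting at s), first one continuing the accumulated word w; trailing partial dropped
def cutRel (mask : Int) : List Char → List Char → Nat → List String
  | _, [], _ => []
  | w, c :: d, s =>
    if PySem.Int.band mask ((2 : Int) ^ s) ≠ 0 then
      String.mk (w ++ [c]) :: cutRel mask [] d (s + 1)
    else cutRel mask (w ++ [c]) d (s + 1)

theorem findA_go_eq_validate (mask : Int) (vocab : List String) :
    ∀ (d : List Char) (s : Nat) (r : PySem.Set String) (w : List Char),
    findA_go mask vocab d s r w = validateB vocab (cutRel mask w d s) r := by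
  intro d
  induction d with
  | nil => intro s r w; rfl
  | cons c d ih =>
    intro s r w
    simp only [findA_go, cutRel]
    by_cases hb : PySem.Int.band mask ((2 : Int) ^ s) ≠ 0
    · rw [if_pos hb, if_pos hb]
      simp only [validateB]
      by_cases hv : vocab.contains (String.mk (w ++ [c])) = false
      · rw [if_pos hv, if_pos hv]
      · rw [if_neg hv, if_neg hv, ih]
    · rw [if_neg hb, if_neg hb, ih]

theorem take_snoc_getElem (cs : List Char) (t s : Nat) (ht : t ≤ s) (hs : s < cs.length) :
    (cs.drop t).take (s + 1 - t) = (cs.drop t).take (s - t) ++ [cs[s]] := by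
  rw [show s + 1 - t = (s - t) + 1 from by omega, List.take_add_one]
  congr 1
  rw [List.getElem?_drop, show t + (s - t) = s from by omega,
    List.getElem?_eq_getElem hs]
  rfl

theorem cutB_eq_cutRel (mask : Int) (cs : List Char) :
    ∀ (k s start : Nat) (acc : List String), s + k = cs.length → start ≤ s →
    cutB cs ((List.range' s k).filter (fun j => decide (PySem.Int.band mask ((2 : Int) ^ j) ≠ 0))) start acc
      = acc ++ cutRel mask ((cs.drop start).take (s - start)) (cs.drop s) s := by
  intro k
  induction k with
  | zero =>
    intro s start acc hlen _
    have hnil : cs.drop s = [] := List.drop_of_length_le (by omega)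
    simp [cutB, hnil, cutRel]
  | succ k ih =>
    intro s start acc hlen hss
    have hs : s < cs.length := by omega
    have hdrop : cs.drop s = cs[s] :: cs.drop (s + 1) := List.drop_eq_getElem_cons hs
    rw [List.range'_succ, List.filter_cons]
    by_cases hb : PySem.Int.band mask ((2 : Int) ^ s) ≠ 0
    · rw [if_pos (by simpa using hb)]
      simp only [cutB]
      rw [ih (s + 1) (s + 1) _ (by omega) (le_refl _)]
      rw [hdrop]
      simp only [cutRel, Nat.sub_self, List.take_zero]
      rw [if_pos hb]
      rw [List.append_assoc]
      congr 2
      rw [show ((s : Int) + 1) = ((s + 1 : Nat) : Int) from by push_cast; ring,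
        PySem.List.slice_natCast, take_snoc_getElem cs start s hss hs]
      simp
    · rw [if_neg (by simpa using hb)]
      rw [ih (s + 1) start _ (by omega) (by omega)]
      rw [hdrop]
      simp only [cutRel]
      rw [if_neg hb]
      rw [take_snoc_getElem cs start s hss hs]

-- ===== VERDICT (by name: the statement is the Claim_ definition above) =====
theorem find_py_spec : Claim_equal_find_py := by
  intro mask text vocabulary _
  unfold Spec_find_py find_py find_py_alt
  rw [findA_go_eq_validate]
  congr 1
  have := cutB_eq_cutRel mask text.toList text.toList.length 0 0 [] (by omega) (by omega)
  rw [← List.range_eq_range'] at this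
  simpa using this.symm
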